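-- pv_equiv track=rewrite | github.com/rangasai018/Encrypted-And-Compressed-Key-Value-Store-Using-Pattern-Analysis | redis_pattern_analysis.py | _detect_naming_patterns
-- ===== SOURCE A (Python) =====
-- from typing import Any, Dict, List, Optional
--
-- def _detect_naming_patterns(keys: List[str]) -> bool:
--     if len(keys) < 3:
--         return False
--     separators = [".", "_", "-", "/"]
--     for sep in separators:
--         if all(sep in key for key in keys):
--             return True
--     try:
--         prefixes = set(key.split("_")[0] for key in keys if "_" in key)
--         if len(prefixes) == 1:
--             return True
--     except Exception:
--         pass
--     return False
-- ===== SOURCE B (Python) =====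
-- def _detect_naming_patterns(keys):
--     n = len(keys)
--     if n < 3:
--         return False
--     c_dot = c_und = c_dash = c_slash = 0
--     und_prefixes = set()
--     for key in keys:
--         if "." in key:
--             c_dot += 1
--         if "_" in key:
--             c_und += 1
--             und_prefixes.add(key.split("_")[0])
--         if "-" in key:
--             c_dash += 1
--         if "/" in key:
--             c_slash += 1
--     if n in (c_dot, c_und, c_dash, c_slash):
--         return True
--     return len(und_prefixes) == 1
-- ===== Notes on version B (the rewrite author's own statement) =====
-- stated objective: alternative
-- what changed: Replaces the four separate all()-scans plus a second prefix-collecting pass with a single pass over keys that tabulates per-separator containment counts and gathers '_'-prefixes at the same time, then compares counts to len(keys).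
import Mathlib
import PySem

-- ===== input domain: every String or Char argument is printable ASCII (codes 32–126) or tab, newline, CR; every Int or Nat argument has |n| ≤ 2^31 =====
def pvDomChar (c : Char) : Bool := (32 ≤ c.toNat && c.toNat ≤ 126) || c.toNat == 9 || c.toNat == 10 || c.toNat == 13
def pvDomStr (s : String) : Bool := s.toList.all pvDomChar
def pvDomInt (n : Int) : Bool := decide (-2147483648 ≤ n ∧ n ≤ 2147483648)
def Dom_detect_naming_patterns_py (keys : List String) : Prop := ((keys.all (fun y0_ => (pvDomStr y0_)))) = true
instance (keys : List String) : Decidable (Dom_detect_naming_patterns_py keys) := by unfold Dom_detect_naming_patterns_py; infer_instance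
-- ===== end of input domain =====

-- B replaces A's four separate all()-scans and separate prefix pass with one tabulating pass
-- (per-separator containment counters + '_'-prefix set); objective: alternative (same cost, one pass).


-- ===== PORT A =====
-- 'for sep in separators: if all(sep in key for key in keys): return True' is the first-match scan List.any;
-- the try/except body cannot raise on string keys, so it is ported directly.
def detect_naming_patterns_py (keys : List String) : Bool :=
  if keys.length < 3 then false
  else
    let separators : List String := [".", "_", "-", "/"]
    if separators.any (fun sep => keys.all (fun k => PySem.Str.isIn sep k)) then
      true
    else
      -- set(key.split("_")[0] for key in keys if "_" in key); split(sep) is never empty, so [0] = headD ""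
      let prefixes := PySem.Set.ofList
        ((keys.filter (fun k => PySem.Str.isIn "_" k)).map
          (fun k => ((PySem.Str.split? k "_").getD []).headD ""))
      if prefixes.length == 1 then true else false

-- ===== PORT B =====
-- one step of B's single pass: four containment counters and the set of '_'-prefixes
def pvStepB (st : Int × Int × Int × Int × PySem.Set String) (k : String) :
    Int × Int × Int × Int × PySem.Set String :=
  (if PySem.Str.isIn "." k then st.1 + 1 else st.1,
   if PySem.Str.isIn "_" k then st.2.1 + 1 else st.2.1,
   if PySem.Str.isIn "-" k then st.2.2.1 + 1 else st.2.2.1,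
   if PySem.Str.isIn "/" k then st.2.2.2.1 + 1 else st.2.2.2.1,
   if PySem.Str.isIn "_" k then st.2.2.2.2.add (((PySem.Str.split? k "_").getD []).headD "")
   else st.2.2.2.2)

def detect_naming_patterns_py_alt (keys : List String) : Bool :=
  let n := keys.length
  if n < 3 then false
  else
    let st := keys.foldl pvStepB (0, 0, 0, 0, PySem.Set.empty)
    if (n : Int) == st.1 || (n : Int) == st.2.1 || (n : Int) == st.2.2.1 || (n : Int) == st.2.2.2.1 then true
    else st.2.2.2.2.length == 1

-- ===== PRECONDITION & SPEC =====
def Spec_detect_naming_patterns_py (keys : List String) (out : Bool) : Prop := out = detect_naming_patterns_py_alt keys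
instance (keys : List String) (out : Bool) : Decidable (Spec_detect_naming_patterns_py keys out) := by unfold Spec_detect_naming_patterns_py; infer_instance

-- ===== CLAIM (what is proved, stated in full; the proofs are below) =====
def Claim_equal_detect_naming_patterns_py : Prop := ∀ (keys : List String), Dom_detect_naming_patterns_py keys → Spec_detect_naming_patterns_py keys (detect_naming_patterns_py keys)

-- ===== LEMMAS AND PROOFS =====

-- invariant of B's single pass: each counter counts the keys containing its separator,
-- and the set component is the fold of Set.add over the '_'-prefixes
set_option maxHeartbeats 1000000 in
theorem pvStepB_fold_spec (keys : List String) (a b c d : Int) (s : PySem.Set String) :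
    keys.foldl pvStepB (a, b, c, d, s) =
      (a + (keys.countP (fun k => PySem.Str.isIn "." k) : Int),
       b + (keys.countP (fun k => PySem.Str.isIn "_" k) : Int),
       c + (keys.countP (fun k => PySem.Str.isIn "-" k) : Int),
       d + (keys.countP (fun k => PySem.Str.isIn "/" k) : Int),
       ((keys.filter (fun k => PySem.Str.isIn "_" k)).map
          (fun k => ((PySem.Str.split? k "_").getD []).headD "")).foldl PySem.Set.add s) := by
  induction keys generalizing a b c d s with
  | nil => simp
  | cons k ks ih =>
      rw [List.foldl_cons, ih]
      simp only [pvStepB, List.countP_cons, List.filter_cons]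
      by_cases h1 : PySem.Str.isIn "." k <;>
        by_cases h2 : PySem.Str.isIn "_" k <;>
          by_cases h3 : PySem.Str.isIn "-" k <;>
            by_cases h4 : PySem.Str.isIn "/" k <;>
              simp only [h1, h2, h3, h4, if_true, if_false, Bool.false_eq_true,
                List.map_cons, List.foldl_cons, Prod.mk.injEq] <;>
              and_intros <;> first | trivial | (push_cast; ring)

-- '(len : Int) == (countP p : Int)' is exactly 'all p'
theorem pvBeqAll (keys : List String) (p : String → Bool) :
    (((keys.length : Int)) == ((keys.countP p : Int))) = keys.all p := by
  rw [Bool.eq_iff_iff]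
  simp only [beq_iff_eq, List.all_eq_true, Int.natCast_inj]
  rw [eq_comm]
  exact List.countP_eq_length

-- ===== VERDICT (by name: the statement is the Claim_ definition above) =====
theorem detect_naming_patterns_py_spec : Claim_equal_detect_naming_patterns_py := by
  intro keys _
  unfold Spec_detect_naming_patterns_py detect_naming_patterns_py detect_naming_patterns_py_alt
  by_cases hlen : keys.length < 3
  · simp [hlen]
  · simp only [hlen, if_false]
    rw [pvStepB_fold_spec]
    simp only [zero_add, List.any_cons, List.any_nil, Bool.or_false,
      pvBeqAll, Bool.or_assoc, PySem.Set.ofList_eq_foldl]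
    have he : (PySem.Set.empty : PySem.Set String) = [] := rfl
    rw [he]
    by_cases hc : (keys.all (fun k => PySem.Str.isIn "." k) ||
        (keys.all (fun k => PySem.Str.isIn "_" k) ||
          (keys.all (fun k => PySem.Str.isIn "-" k) ||
            keys.all (fun k => PySem.Str.isIn "/" k)))) = true
    · rw [if_pos hc, if_pos hc]
    · rw [if_neg hc, if_neg hc]
      split_ifs with h
      · exact h.symm
      · exact ((Bool.not_eq_true _).mp h).symm
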